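-- pv_equiv track=rewrite | github.com/wyz2368/credit_networks | classic_EGTA/player_reduction.py | deviation_preserve_reduction
-- ===== SOURCE A (Python) =====
-- def deviation_preserve_reduction(reduced_profile, num_players, reduce_num_players):
--     if sum(reduced_profile) != reduce_num_players:
--         raise ValueError("sum(reduced_profile) != reduce_num_players")
--     num_strategies = len(reduced_profile)
--     original_profiles = []
--     coef = int((num_players - 1)/(reduce_num_players - 1))
--
--     for i in range(num_strategies):
--         original_profile = []
--         if reduced_profile[i] == 0:
--             continue
--         for j, reduced_count in enumerate(reduced_profile):
--             if reduced_count == 0: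
--                 original_profile.append(0)
--                 continue
--             if i == j:
--                 original_cnt = coef * (reduced_count - 1) + 1
--             else:
--                 original_cnt = coef * reduced_count
--             original_profile.append(original_cnt)
--
--         original_profiles.append(original_profile)
--
--     return original_profiles
-- ===== SOURCE B (Python) =====
-- def deviation_preserve_reduction(reduced_profile, num_players, reduce_num_players):
--     if sum(reduced_profile) != reduce_num_players:
--         raise ValueError("sum(reduced_profile) != reduce_num_players")
--     coef = int((num_players - 1)/(reduce_num_players - 1))
--
--     def rows(prefix, rest):
--         # structural recursion on the suffix, carrying the already-scaled prefix
--         if not rest: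
--             return []
--         c, tail = rest[0], rest[1:]
--         later = rows(prefix + [coef * c], tail)
--         if c == 0:
--             return later
--         return [prefix + [coef * (c - 1) + 1] + [coef * t for t in tail]] + later
--
--     return rows([], reduced_profile)
-- ===== Notes on version B (the rewrite author's own statement) =====
-- stated objective: alternative
-- what changed: B replaces A's index-based double loop (i/j with an i==j diagonal test) by an index-free structural recursion on the profile that carries the already-scaled prefix as an accumulator and emits each deviation row as prefix + deviated head + scaled tail.
import Mathlib
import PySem

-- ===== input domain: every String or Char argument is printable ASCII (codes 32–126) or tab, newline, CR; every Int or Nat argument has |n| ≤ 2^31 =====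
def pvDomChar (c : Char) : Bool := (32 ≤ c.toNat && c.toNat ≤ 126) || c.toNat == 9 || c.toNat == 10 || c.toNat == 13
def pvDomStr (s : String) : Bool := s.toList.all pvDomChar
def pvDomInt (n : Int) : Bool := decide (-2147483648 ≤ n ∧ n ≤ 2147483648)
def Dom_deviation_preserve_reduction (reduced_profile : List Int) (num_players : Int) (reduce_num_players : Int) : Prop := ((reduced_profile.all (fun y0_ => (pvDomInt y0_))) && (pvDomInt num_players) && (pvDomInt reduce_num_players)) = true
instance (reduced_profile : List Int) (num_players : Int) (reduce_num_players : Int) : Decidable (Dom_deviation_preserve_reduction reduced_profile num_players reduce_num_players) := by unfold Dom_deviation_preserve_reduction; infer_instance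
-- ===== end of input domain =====

-- B replaces A's index-based double loop by an index-free structural recursion on the profile
-- carrying the scaled prefix as an accumulator; return values agree on Pre_.

-- ===== PORT A =====
-- coef = int((num_players-1)/(reduce_num_players-1)): Python float division then int() truncation toward
-- zero; for |arguments| ≤ 2^31 (the Dom bound) the float quotient never rounds across an integer, so it
-- equals truncated integer division Int.tdiv — exact on the stated domain.
def deviation_preserve_reduction (reduced_profile : List Int) (num_players : Int) (reduce_num_players : Int) : List (List Int) :=
  let num_strategies : Int := reduced_profile.length
  let coef : Int := Int.tdiv (num_players - 1) (reduce_num_players - 1)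
  (PySem.List.pyRange 0 num_strategies 1).foldl (fun acc i =>
    -- reduced_profile[i]: i is always in range here, so the default is never read
    if PySem.List.pyGetD reduced_profile i 0 == 0 then acc
    else
      acc ++ [(PySem.List.enumerate reduced_profile 0).foldl (fun p jc =>
        if jc.2 == 0 then p ++ [(0 : Int)]
        else if i == jc.1 then p ++ [coef * (jc.2 - 1) + 1]
        else p ++ [coef * jc.2]) []]) []

-- ===== PORT B =====
-- rows(prefix, rest): structural recursion on the suffix, carrying the already-scaled prefix
def dpr_rows (coef : Int) (pre : List Int) : List Int → List (List Int)
  | [] => []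
  | c :: tail =>
    let later := dpr_rows coef (pre ++ [coef * c]) tail
    if c == 0 then later
    else (pre ++ [coef * (c - 1) + 1] ++ tail.map (fun t => coef * t)) :: later

def deviation_preserve_reduction_alt (reduced_profile : List Int) (num_players : Int) (reduce_num_players : Int) : List (List Int) :=
  let coef : Int := Int.tdiv (num_players - 1) (reduce_num_players - 1)
  dpr_rows coef [] reduced_profile

-- ===== PRECONDITION & SPEC =====
-- Pre_ excludes exactly the inputs where A raises: ValueError when sum(reduced_profile) ≠
-- reduce_num_players, ZeroDivisionError when reduce_num_players = 1.
def Pre_deviation_preserve_reduction (reduced_profile : List Int) (num_players : Int) (reduce_num_players : Int) : Prop :=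
  reduced_profile.sum = reduce_num_players ∧ reduce_num_players ≠ 1
instance (reduced_profile : List Int) (num_players : Int) (reduce_num_players : Int) : Decidable (Pre_deviation_preserve_reduction reduced_profile num_players reduce_num_players) := by unfold Pre_deviation_preserve_reduction; infer_instance

def pvWitness_deviation_preserve_reduction : List Int × Int × Int := ([1, 2], 5, 3)

def Spec_deviation_preserve_reduction (reduced_profile : List Int) (num_players : Int) (reduce_num_players : Int) (out : List (List Int)) : Prop := out = deviation_preserve_reduction_alt reduced_profile num_players reduce_num_players
instance (reduced_profile : List Int) (num_players : Int) (reduce_num_players : Int) (out : List (List Int)) : Decidable (Spec_deviation_preserve_reduction reduced_profile num_players reduce_num_players out) := by unfold Spec_deviation_preserve_reduction; infer_instance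

-- ===== CLAIM (what is proved, stated in full; the proofs are below) =====
def Claim_equal_deviation_preserve_reduction : Prop := ∀ (reduced_profile : List Int) (num_players : Int) (reduce_num_players : Int), Dom_deviation_preserve_reduction reduced_profile num_players reduce_num_players → Pre_deviation_preserve_reduction reduced_profile num_players reduce_num_players → Spec_deviation_preserve_reduction reduced_profile num_players reduce_num_players (deviation_preserve_reduction reduced_profile num_players reduce_num_players)

-- ===== LEMMAS AND PROOFS =====

-- common normal form both ports are reduced to
def dprSpec (coef : Int) (pre : List Int) (r : List Int) : List (List Int) :=
  (List.range r.length).filterMap (fun k =>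
    if r[k]?.getD 0 == 0 then none
    else some (pre ++ (r.map (fun c => coef * c)).set k (coef * (r[k]?.getD 0 - 1) + 1)))

lemma dpr_rows_eq_spec (coef : Int) (pre r : List Int) :
    dpr_rows coef pre r = dprSpec coef pre r := by
  induction r generalizing pre with
  | nil => rfl
  | cons c tail ih =>
    unfold dprSpec
    rw [List.length_cons, List.range_succ_eq_map, List.filterMap_cons, List.filterMap_map]
    have htail : (List.range tail.length).filterMap
        ((fun k => if (c :: tail)[k]?.getD 0 == 0 then none
          else some (pre ++ ((c :: tail).map (fun c => coef * c)).set k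
            (coef * ((c :: tail)[k]?.getD 0 - 1) + 1))) ∘ Nat.succ)
        = dprSpec coef (pre ++ [coef * c]) tail := by
      unfold dprSpec
      refine List.filterMap_congr ?_
      intro k _
      simp [Function.comp, List.append_assoc]
    rw [htail, ← ih]
    by_cases h : c = 0
    · simp [dpr_rows, h]
    · simp only [dpr_rows, List.getElem?_cons_zero, Option.getD_some, List.map_cons, List.set]
      simp [h, List.append_assoc]

-- (filter then map) as a single filterMap, used to align A's loop shape with the normal form.
lemma filter_map_eq_filterMap {α β : Type} (l : List α) (p : α → Bool) (f : α → β) :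
    (l.filter p).map f = l.filterMap (fun x => if p x then some (f x) else none) := by
  induction l with
  | nil => rfl
  | cons x t ih => by_cases h : p x <;> simp [h, ih]

-- A's inner loop at outer index i, with r[i] ≠ 0, builds exactly the set-one-slot row.
lemma inner_row_eq (r : List Int) (coef : Int) (i : Nat) (hi : i < r.length)
    (hnz : ¬ r[i] = 0) :
    (PySem.List.enumerate r 0).foldl (fun p jc =>
        if jc.2 == 0 then p ++ [(0 : Int)]
        else if (i : Int) == jc.1 then p ++ [coef * (jc.2 - 1) + 1]
        else p ++ [coef * jc.2]) []
      = (r.map (fun c => coef * c)).set i (coef * (r[i] - 1) + 1) := by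
  have h1 : (PySem.List.enumerate r 0).foldl (fun p jc =>
        if jc.2 == 0 then p ++ [(0 : Int)]
        else if (i : Int) == jc.1 then p ++ [coef * (jc.2 - 1) + 1]
        else p ++ [coef * jc.2]) []
      = (PySem.List.enumerate r 0).foldl (fun p (jc : Int × Int) =>
        p ++ [if jc.2 == 0 then (0 : Int)
              else if (i : Int) == jc.1 then coef * (jc.2 - 1) + 1
              else coef * jc.2]) [] := by
    refine PySem.List.foldl_congr_mem _ _ _ _ ?_
    intro acc x _
    by_cases h : x.2 == 0 <;> by_cases h2 : (i : Int) == x.1 <;> simp [h, h2]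
  rw [h1, PySem.List.foldl_append_singleton_eq_map]
  apply List.ext_getElem
  · simp
  · intro k hk hk'
    have hkr : k < r.length := by simpa using hk
    simp only [List.nil_append, List.getElem_map, PySem.List.getElem_enumerate, List.getElem_set]
    by_cases hik : i = k
    · subst hik
      simp [hnz]
    · have : ¬ ((i : Int) == ((0:Int) + k)) := by simp; omega
      simp only [this]
      by_cases hz : r[k] = 0 <;> simp [hz, hik]

-- A's whole computation equals the normal form with empty prefix.
lemma portA_eq_spec (r : List Int) (coef : Int) :
    (PySem.List.pyRange 0 (r.length : Int) 1).foldl (fun acc i =>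
       if PySem.List.pyGetD r i 0 == 0 then acc
       else
         acc ++ [(PySem.List.enumerate r 0).foldl (fun p jc =>
           if jc.2 == 0 then p ++ [(0 : Int)]
           else if i == jc.1 then p ++ [coef * (jc.2 - 1) + 1]
           else p ++ [coef * jc.2]) []]) []
      = dprSpec coef [] r := by
  have hA1 : (PySem.List.pyRange 0 (r.length : Int) 1).foldl (fun acc i =>
       if PySem.List.pyGetD r i 0 == 0 then acc
       else
         acc ++ [(PySem.List.enumerate r 0).foldl (fun p jc =>
           if jc.2 == 0 then p ++ [(0 : Int)]
           else if i == jc.1 then p ++ [coef * (jc.2 - 1) + 1]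
           else p ++ [coef * jc.2]) []]) []
      = (PySem.List.pyRange 0 (r.length : Int) 1).foldl (fun acc i =>
       if (!(PySem.List.pyGetD r i 0 == 0)) = true then
         acc ++ [(PySem.List.enumerate r 0).foldl (fun p jc =>
           if jc.2 == 0 then p ++ [(0 : Int)]
           else if i == jc.1 then p ++ [coef * (jc.2 - 1) + 1]
           else p ++ [coef * jc.2]) []]
       else acc) [] := by
    refine PySem.List.foldl_congr_mem _ _ _ _ ?_
    intro acc i _
    by_cases h : PySem.List.pyGetD r i 0 == 0 <;> simp [h]
  rw [hA1, PySem.List.foldl_append_if, List.nil_append, filter_map_eq_filterMap,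
      PySem.List.pyRange_one, List.filterMap_map]
  have hlen : ((r.length : Int) - 0).toNat = r.length := by omega
  rw [hlen]
  unfold dprSpec
  refine List.filterMap_congr ?_
  intro k hk
  have hkr : k < r.length := List.mem_range.mp hk
  have hgetD : r[k]?.getD 0 = r[k] := by rw [List.getElem?_eq_getElem hkr]; rfl
  simp only [Function.comp, hgetD, zero_add]
  by_cases hz : r[k] = 0
  · simp [hgetD, hz]
  · simp [hgetD, hz]
    simpa using inner_row_eq r coef k hkr hz

-- ===== VERDICT (by name: the statement is the Claim_ definition above) =====
theorem deviation_preserve_reduction_spec : Claim_equal_deviation_preserve_reduction := by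
  intro r np rnp _ _
  unfold Spec_deviation_preserve_reduction deviation_preserve_reduction deviation_preserve_reduction_alt
  simp only []
  rw [portA_eq_spec, dpr_rows_eq_spec]
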